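-- pv_equiv track=rewrite | github.com/alvarorrm/simple-expression-string-calculator | main.py | get_parenthesis_depths
-- ===== SOURCE A (Python) =====
-- def get_parenthesis_depths(expression):
--
--     if ")(" in expression or "()" in expression:
--         raise SyntaxError("')(' and '()' are not allowed")
--
--     depths = []
--     current_depth = 0
--     for char in expression:
--         if char == "(":
--             current_depth += 1
--             depths.append(current_depth)
--         elif char == ")":
--             depths.append(current_depth)
--             current_depth -= 1
--         else:
--             depths.append(current_depth)
--         if current_depth < 0:
--             raise SyntaxError("Mismatched parentheses: missing opening parenthesis")
--
--     if current_depth != 0: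
--         raise SyntaxError("Mismatched parentheses: missing closed parenthesis")
--
--     return depths
-- ===== SOURCE B (Python) =====
-- from itertools import accumulate
--
-- def get_parenthesis_depths(expression):
--     if ")(" in expression or "()" in expression:
--         raise SyntaxError("')(' and '()' are not allowed")
--
--     deltas = [1 if c == "(" else -1 if c == ")" else 0 for c in expression]
--     sums = list(accumulate(deltas))
--
--     depths = []
--     prev = 0
--     for s in sums:
--         depths.append(max(prev, s))
--         if s < 0:
--             raise SyntaxError("Mismatched parentheses: missing opening parenthesis")
--         prev = s
--
--     if sum(deltas) != 0:
--         raise SyntaxError("Mismatched parentheses: missing closed parenthesis")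
--
--     return depths
-- ===== Notes on version B (the rewrite author's own statement) =====
-- stated objective: alternative
-- what changed: B replaces A's per-character branch-and-append loop by a data-flow pipeline: map each char to a delta, take prefix sums via itertools.accumulate, and emit max(prev_sum, cur_sum) per position; errors are detected from the sums (first negative prefix sum, non-zero total) instead of loop state.
-- outside the precondition, e.g. on get_parenthesis_depths('(a'): A raises SyntaxError, B raises SyntaxError; on get_parenthesis_depths(')a('): A raises SyntaxError, B raises SyntaxError
import Mathlib
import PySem

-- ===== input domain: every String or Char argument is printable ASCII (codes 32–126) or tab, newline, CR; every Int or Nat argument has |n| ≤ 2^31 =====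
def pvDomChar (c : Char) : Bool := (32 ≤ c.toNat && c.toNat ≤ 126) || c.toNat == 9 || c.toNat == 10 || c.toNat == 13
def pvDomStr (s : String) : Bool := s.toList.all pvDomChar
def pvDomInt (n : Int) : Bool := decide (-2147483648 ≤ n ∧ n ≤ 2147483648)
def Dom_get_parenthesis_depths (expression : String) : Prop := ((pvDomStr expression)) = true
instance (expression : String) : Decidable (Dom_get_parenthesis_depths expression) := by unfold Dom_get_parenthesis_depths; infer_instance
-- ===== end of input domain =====

-- B is an alternative decomposition (delta map + prefix sums + max(prev,cur) per position)
-- of A's branch-and-append loop; equivalence of the RETURN value is proved on Pre_ (= exactly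
-- the inputs where A raises no SyntaxError).

-- ===== PORT A =====
-- A's for-loop: state = (remaining chars, current_depth, depths built so far);
-- `none` marks the raised SyntaxError (those inputs lie outside Pre_).
def aLoop : List Char → Int → List Int → Option (List Int)
  | [], d, acc => if d ≠ 0 then none else some acc
  | c :: rest, d, acc =>
    if c = '(' then
      -- current_depth += 1; append new depth; then the `< 0` check
      (if d + 1 < 0 then none else aLoop rest (d + 1) (acc ++ [d + 1]))
    else if c = ')' then
      -- append old depth; current_depth -= 1; then the `< 0` check
      (if d - 1 < 0 then none else aLoop rest (d - 1) (acc ++ [d]))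
    else
      (if d < 0 then none else aLoop rest d (acc ++ [d]))

def get_parenthesis_depths (expression : String) : List Int :=
  -- `")(" in expression or "()" in expression` → raise (outside Pre_)
  if PySem.Str.isIn ")(" expression || PySem.Str.isIn "()" expression then []
  else (aLoop expression.toList 0 []).getD []

-- ===== PORT B =====
-- B's delta map: +1 for '(', -1 for ')', 0 otherwise
def bDelta (c : Char) : Int := if c = '(' then 1 else if c = ')' then -1 else 0

-- B's loop over the accumulated prefix sums, carrying prev; `none` = the in-loop raise
def bLoop : List Int → Int → Option (List Int)
  | [], _ => some []
  | s :: rest, prev =>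
    if s < 0 then none
    else (bLoop rest s).map (fun t => max prev s :: t)

def get_parenthesis_depths_alt (expression : String) : List Int :=
  if PySem.Str.isIn ")(" expression || PySem.Str.isIn "()" expression then []
  else
    let deltas := expression.toList.map bDelta
    let sums := (deltas.scanl (· + ·) 0).tail   -- itertools.accumulate
    match bLoop sums 0 with
    | none => []
    | some depths => if deltas.sum ≠ 0 then [] else depths

-- ===== PRECONDITION & SPEC =====
-- Pre_ = exactly the inputs on which A returns normally: the two forbidden substrings are
-- absent, every prefix of the paren-deltas has a non-negative sum, and the total sum is zero
-- (on the excluded inputs A raises SyntaxError, and so does B).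
def Pre_get_parenthesis_depths (expression : String) : Prop :=
  PySem.Str.isIn ")(" expression = false ∧ PySem.Str.isIn "()" expression = false ∧
  (∀ k : Nat, k < expression.toList.length + 1 →
      0 ≤ ((expression.toList.take k).map bDelta).sum) ∧
  (expression.toList.map bDelta).sum = 0
instance (expression : String) : Decidable (Pre_get_parenthesis_depths expression) := by
  unfold Pre_get_parenthesis_depths; infer_instance

def pvWitness_get_parenthesis_depths : String := "(1 + (a))"

def Spec_get_parenthesis_depths (expression : String) (out : List Int) : Prop := out = get_parenthesis_depths_alt expression
instance (expression : String) (out : List Int) : Decidable (Spec_get_parenthesis_depths expression out) := by unfold Spec_get_parenthesis_depths; infer_instance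

-- ===== CLAIM (what is proved, stated in full; the proofs are below) =====
def Claim_equal_get_parenthesis_depths : Prop := ∀ (expression : String), Dom_get_parenthesis_depths expression → Pre_get_parenthesis_depths expression → Spec_get_parenthesis_depths expression (get_parenthesis_depths expression)

-- ===== LEMMAS AND PROOFS =====

-- the common value list both loops produce from start depth d
def pureDepths : List Char → Int → List Int
  | [], _ => []
  | c :: rest, d => max d (d + bDelta c) :: pureDepths rest (d + bDelta c)

lemma aLoop_eq (l : List Char) : ∀ (d : Int) (acc : List Int),
    (∀ k : Nat, k < l.length + 1 → 0 ≤ d + ((l.take k).map bDelta).sum) →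
    d + (l.map bDelta).sum = 0 →
    aLoop l d acc = some (acc ++ pureDepths l d) := by
  induction l with
  | nil =>
    intro d acc _ hsum
    simp only [List.map_nil, List.sum_nil, add_zero] at hsum
    simp [aLoop, pureDepths, hsum]
  | cons c rest ih =>
    intro d acc hpre hsum
    have h0 : 0 ≤ d := by
      have := hpre 0 (by omega); simpa using this
    have h1 : 0 ≤ d + bDelta c := by
      have := hpre 1 (by simp only [List.length_cons]; omega); simpa using this
    have hpre' : ∀ k : Nat, k < rest.length + 1 →
        0 ≤ (d + bDelta c) + ((rest.take k).map bDelta).sum := by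
      intro k hk
      have := hpre (k + 1) (by simp; omega)
      simpa [List.take_succ_cons, add_assoc] using this
    have hsum' : (d + bDelta c) + (rest.map bDelta).sum = 0 := by
      simp only [List.map_cons, List.sum_cons] at hsum; linarith
    by_cases hop : c = '('
    · subst hop
      have hd : bDelta '(' = 1 := by simp [bDelta]
      rw [hd] at h1 hpre' hsum'
      have hlt : ¬ d + 1 < 0 := by omega
      simp only [aLoop, if_neg hlt]
      rw [ih (d + 1) (acc ++ [d + 1]) hpre' hsum']
      simp [pureDepths, hd]
    · by_cases hcl : c = ')'
      · subst hcl
        have hd : bDelta ')' = -1 := by simp [bDelta]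
        rw [hd] at h1 hpre' hsum'
        have hge : ¬ d - 1 < 0 := by omega
        simp only [aLoop, if_neg hop, if_neg hge]
        rw [show d - 1 = d + -1 by ring, ih (d + -1) (acc ++ [d]) hpre' hsum']
        simp [pureDepths, hd]
      · have hd : bDelta c = 0 := by simp [bDelta, hop, hcl]
        rw [hd, add_zero] at h1 hpre' hsum'
        have hlt : ¬ d < 0 := by omega
        simp only [aLoop, if_neg hop, if_neg hcl, if_neg hlt]
        rw [ih d (acc ++ [d]) hpre' hsum']
        simp [pureDepths, hd]

lemma bLoop_eq (l : List Char) : ∀ (d : Int),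
    (∀ k : Nat, k < l.length + 1 → 0 ≤ d + ((l.take k).map bDelta).sum) →
    bLoop ((l.map bDelta).scanl (· + ·) d).tail d = some (pureDepths l d) := by
  induction l with
  | nil => intro d _; simp [bLoop, pureDepths, List.scanl]
  | cons c rest ih =>
    intro d hpre
    have h1 : 0 ≤ d + bDelta c := by
      have := hpre 1 (by simp only [List.length_cons]; omega); simpa using this
    have hpre' : ∀ k : Nat, k < rest.length + 1 →
        0 ≤ (d + bDelta c) + ((rest.take k).map bDelta).sum := by
      intro k hk
      have := hpre (k + 1) (by simp; omega)
      simpa [List.take_succ_cons, add_assoc] using this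
    have hnn : ¬ d + bDelta c < 0 := by omega
    simp only [List.map_cons, List.scanl_cons, List.tail_cons]
    rw [show (List.scanl (· + ·) (d + bDelta c) (rest.map bDelta)) =
        (d + bDelta c) :: ((rest.map bDelta).scanl (· + ·) (d + bDelta c)).tail by
      cases rest <;> simp [List.scanl]]
    simp only [bLoop, if_neg hnn]
    rw [ih (d + bDelta c) hpre']
    simp [pureDepths]

-- ===== VERDICT (by name: the statement is the Claim_ definition above) =====
theorem get_parenthesis_depths_spec : Claim_equal_get_parenthesis_depths := by
  intro e _ hpre
  obtain ⟨h1, h2, h3, h4⟩ := hpre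
  unfold Spec_get_parenthesis_depths get_parenthesis_depths get_parenthesis_depths_alt
  rw [h1, h2]
  simp only [Bool.false_or, if_neg (by simp : ¬ (false : Bool) = true)]
  have hpre0 : ∀ k : Nat, k < e.toList.length + 1 →
      0 ≤ (0 : Int) + ((e.toList.take k).map bDelta).sum := by
    intro k hk; simpa using h3 k hk
  rw [aLoop_eq e.toList 0 [] hpre0 (by simpa using h4), bLoop_eq e.toList 0 hpre0]
  simp [h4]
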